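-- pv_equiv track=rewrite | github.com/SergioCezar/algorithm-design | dp-domino_effect.py | efeito_domino
-- ===== SOURCE A (Python) =====
-- def efeito_domino(N, H, D):
--     # Calcula a posição cumulativa de cada peça ao longo da linha
--     x = [0] * N
--     for i in range(1, N):
--         x[i] = x[i-1] + D[i-1]
--
--     # dp[i]: o maior número de peças que podem ser mantidas no lugar até a peça i
--     dp = [float('-inf')] * N
--     dp[0] = 1  # Sempre mantemos a primeira peça fixa
--
--     # Para cada peça i, tentamos estender a melhor solução de alguma peça anterior j
--     for i in range(1, N):
--         for j in range(0, i):
--             # Verifica se o segmento de j até i respeita o limite de altura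
--             if x[i] - x[j] <= (i - j) * H:
--                 # Se for possível, atualiza dp[i] se encontrarmos um caminho melhor
--                 if dp[j] + 1 > dp[i]:
--                     dp[i] = dp[j] + 1
--
--         # Se nenhuma transição foi válida, marcamos dp[i] como inalcançável
--         if dp[i] < 1:
--             dp[i] = float('-inf')
--
--     # Verifica se a última peça pode ser alcançada mantendo ao menos a primeira e a última fixas
--     if dp[N-1] < 2:
--         return -1
--     else:
--         # O número de peças removidas é o total menos o número de peças mantidas
--         return N - dp[N-1]
-- ===== SOURCE B (Python) =====
-- def efeito_domino(N, H, D):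
--     # g[i] = x[i] - i*H; the segment condition x[i]-x[j] <= (i-j)*H is g[i] <= g[j],
--     # so kept pieces form a non-increasing chain of g starting at g[0] = 0.
--     g = []
--     acc = 0
--     for i in range(N):
--         if i:
--             acc += D[i - 1]
--         g.append(acc - i * H)
--     if N == 1 or g[N - 1] > 0:
--         return -1
--     # Patience-style longest non-increasing chain over eligible values (g[i] <= 0),
--     # tails[k] = largest possible last value of a chain of length k+1.
--     tails = []
--     last_len = 0
--     for v in g[1:]:
--         if v > 0:
--             continue
--         lo, hi = 0, len(tails)
--         while lo < hi:
--             mid = (lo + hi) // 2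
--             if tails[mid] < v:
--                 hi = mid
--             else:
--                 lo = mid + 1
--         if lo == len(tails):
--             tails.append(v)
--         else:
--             tails[lo] = v
--         last_len = lo + 1
--     return N - (last_len + 1)
-- ===== Notes on version B (the rewrite author's own statement) =====
-- stated objective: faster
-- what changed: Rewrites the segment constraint x[i]-x[j] <= (i-j)*H as g(i) <= g(j) for g(k) = x[k]-k*H and replaces A's O(N^2) all-pairs DP by a patience-style longest non-increasing-chain computation over g with a binary-searched tails array.
import Mathlib
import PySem

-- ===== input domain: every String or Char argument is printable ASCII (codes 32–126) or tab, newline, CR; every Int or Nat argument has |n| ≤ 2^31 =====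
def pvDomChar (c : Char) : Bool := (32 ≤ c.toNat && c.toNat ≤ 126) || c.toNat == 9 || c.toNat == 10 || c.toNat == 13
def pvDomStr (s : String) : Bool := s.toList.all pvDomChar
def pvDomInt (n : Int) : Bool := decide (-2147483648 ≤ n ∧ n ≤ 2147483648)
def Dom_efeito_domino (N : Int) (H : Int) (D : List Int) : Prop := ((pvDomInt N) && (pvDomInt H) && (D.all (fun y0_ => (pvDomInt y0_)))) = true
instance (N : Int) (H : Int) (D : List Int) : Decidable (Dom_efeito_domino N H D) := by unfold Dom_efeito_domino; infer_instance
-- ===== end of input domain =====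

-- B replaces A's O(N^2) all-pairs DP by a patience-style longest non-increasing chain
-- over g(i) = x(i) - i*H with binary search (objective: faster, asymptotic).

-- ===== PORT A =====
-- float('-inf') sentinel modeled as `none`; dp cells are `some k` otherwise.
def pvOptLt : Option Int → Option Int → Bool
  | none, none => false
  | none, some _ => true
  | some _, none => false
  | some a, some b => decide (a < b)

def pvOptAdd1 : Option Int → Option Int
  | none => none
  | some a => some (a + 1)

-- x: cumulative positions (the first loop of A)
def pvAx (N : Int) (H : Int) (D : List Int) : List Int :=
  (PySem.List.pyRange 1 N 1).foldl
    (fun x i => PySem.List.pySetD x i (PySem.List.pyGetD x (i-1) 0 + PySem.List.pyGetD D (i-1) 0))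
    (List.replicate N.toNat 0)

-- dp table after the double loop of A
def pvAdp (N : Int) (H : Int) (D : List Int) : List (Option Int) :=
  (PySem.List.pyRange 1 N 1).foldl
    (fun dp i =>
      let dpi := (PySem.List.pyRange 0 i 1).foldl
        (fun dpi j =>
          if PySem.List.pyGetD (pvAx N H D) i 0 - PySem.List.pyGetD (pvAx N H D) j 0 ≤ (i - j) * H then
            if pvOptLt dpi (pvOptAdd1 (PySem.List.pyGetD dp j none)) then
              pvOptAdd1 (PySem.List.pyGetD dp j none)
            else dpi
          else dpi)
        (PySem.List.pyGetD dp i none)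
      let dpi := if pvOptLt dpi (some 1) then none else dpi
      PySem.List.pySetD dp i dpi)
    (PySem.List.pySetD (List.replicate N.toNat (none : Option Int)) 0 (some 1))

def efeito_domino (N : Int) (H : Int) (D : List Int) : Int :=
  if pvOptLt (PySem.List.pyGetD (pvAdp N H D) (N-1) none) (some 2) then -1
  else N - (PySem.List.pyGetD (pvAdp N H D) (N-1) none).getD 0

-- ===== PORT B =====
-- the hand-written binary search of Source B: leftmost index with tails[k] < v
def pvBSearch (tails : List Int) (v : Int) (lo hi : Nat) : Nat :=
  if h : lo < hi then
    let mid := (lo + hi) / 2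
    if tails.getD mid 0 < v then pvBSearch tails v lo mid
    else pvBSearch tails v (mid + 1) hi
  else lo
termination_by hi - lo
decreasing_by all_goals omega

-- g[i] = x[i] - i*H, built in one pass
def pvBg (N : Int) (H : Int) (D : List Int) : List Int :=
  ((List.range N.toNat).foldl
    (fun (p : List Int × Int) i =>
      let acc := if i = 0 then p.2 else p.2 + D.getD (i-1) 0
      (p.1 ++ [acc - (i : Int) * H], acc))
    ([], 0)).1

-- one step of the patience loop: (tails, last_len) updated by value v
def pvPatStep (p : List Int × Nat) (v : Int) : List Int × Nat :=
  if 0 < v then p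
  else
    let lo := pvBSearch p.1 v 0 p.1.length
    (if lo = p.1.length then p.1 ++ [v] else p.1.set lo v, lo + 1)

def efeito_domino_alt (N : Int) (H : Int) (D : List Int) : Int :=
  if N = 1 ∨ 0 < (pvBg N H D).getD (N.toNat - 1) 0 then -1
  else N - ((((pvBg N H D).drop 1).foldl pvPatStep ([], 0)).2 + 1)

-- ===== PRECONDITION & SPEC =====
-- Pre: exactly the inputs where the Python A returns (N ≤ 0 or N-1 > len(D) raise IndexError).
def Pre_efeito_domino (N : Int) (H : Int) (D : List Int) : Prop :=
  1 ≤ N ∧ N - 1 ≤ (D.length : Int)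
instance (N : Int) (H : Int) (D : List Int) : Decidable (Pre_efeito_domino N H D) := by
  unfold Pre_efeito_domino; infer_instance

def pvWitness_efeito_domino : Int × Int × List Int := (2, 1, [1])

def Spec_efeito_domino (N : Int) (H : Int) (D : List Int) (out : Int) : Prop := out = efeito_domino_alt N H D
instance (N : Int) (H : Int) (D : List Int) (out : Int) : Decidable (Spec_efeito_domino N H D out) := by unfold Spec_efeito_domino; infer_instance

-- ===== CLAIM (what is proved, stated in full; the proofs are below) =====
def Claim_equal_efeito_domino : Prop := ∀ (N : Int) (H : Int) (D : List Int), Dom_efeito_domino N H D → Pre_efeito_domino N H D → Spec_efeito_domino N H D (efeito_domino N H D)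

-- ===== LEMMAS AND PROOFS =====

-- reference quantities: x(k) = prefix sum, g(k) = x(k) - k*H
def pvXf (D : List Int) (k : Nat) : Int := (D.take k).sum
def pvGf (H : Int) (D : List Int) (k : Nat) : Int := pvXf D k - (k : Int) * H
-- M = best previous chain length among stored pairs (value, length) with value ≥ v
def pvStepM (v : Int) (ps : List (Int × Nat)) : Nat :=
  ps.foldl (fun m p => if v ≤ p.1 then max m p.2 else m) 0
def pvPsStep (ps : List (Int × Nat)) (v : Int) : List (Int × Nat) :=
  if v ≤ 0 then ps ++ [(v, 1 + pvStepM v ps)] else ps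
def pvVm (H : Int) (D : List Int) (m : Nat) : List Int := (List.range m).map (fun j => pvGf H D (j+1))
def pvPs (H : Int) (D : List Int) (m : Nat) : List (Int × Nat) := (pvVm H D m).foldl pvPsStep []
-- the value A's dp[i] holds at the end
def pvDpv (H : Int) (D : List Int) (i : Nat) : Option Int :=
  if i = 0 then some 1
  else if pvGf H D i ≤ 0 then some (2 + (pvStepM (pvGf H D i) (pvPs H D (i-1)) : Int)) else none

def pvMaxLen (ps : List (Int × Nat)) : Nat := ps.foldl (fun m p => max m p.2) 0

-- patience invariant: tails[k] = largest stored value of chain length k+1, tails non-increasing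
def pvGood (ps : List (Int × Nat)) (tails : List Int) : Prop :=
  tails.length = pvMaxLen ps
  ∧ (∀ k, k < tails.length → ∃ p ∈ ps, p.2 = k + 1 ∧ p.1 = tails.getD k 0)
  ∧ (∀ p ∈ ps, p.2 - 1 < tails.length ∧ p.1 ≤ tails.getD (p.2 - 1) 0 ∧ 1 ≤ p.2)
  ∧ (∀ k l, k ≤ l → l < tails.length → tails.getD l 0 ≤ tails.getD k 0)

-- --- small list helpers ---
theorem pvGetD_map_range {α : Type} [Inhabited α] (n k : Nat) (f : Nat → α) (d : α) (h : k < n) :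
    ((List.range n).map f).getD k d = f k := by
  rw [List.getD_eq_getElem?_getD]
  simp [List.getElem?_map, List.getElem?_range h]

theorem pvGetD_append_lt {α : Type} (l l' : List α) (k : Nat) (d : α) (h : k < l.length) :
    (l ++ l').getD k d = l.getD k d := by
  rw [List.getD_eq_getElem?_getD, List.getD_eq_getElem?_getD, List.getElem?_append_left h]

theorem pvGetD_append_right {α : Type} (l : List α) (a : α) (d : α) :
    (l ++ [a]).getD l.length d = a := by
  rw [List.getD_eq_getElem?_getD]
  simp

theorem pvGetD_set_self {α : Type} (l : List α) (i : Nat) (v d : α) (h : i < l.length) :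
    (l.set i v).getD i d = v := by
  rw [List.getD_eq_getElem?_getD]
  simp [List.getElem?_set_self, h]

theorem pvGetD_set_ne {α : Type} (l : List α) (i k : Nat) (v d : α) (h : k ≠ i) :
    (l.set i v).getD k d = l.getD k d := by
  rw [List.getD_eq_getElem?_getD, List.getD_eq_getElem?_getD, List.getElem?_set_ne (by omega)]

theorem pvMapRange_set {α : Type} (n i : Nat) (f : Nat → α) (v : α) (h : i < n) :
    ((List.range n).map f).set i v = (List.range n).map (fun k => if k = i then v else f k) := by
  apply List.ext_getElem
  · simp
  · intro k hk hk'
    simp only [List.length_map, List.length_range] at hk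
    by_cases hki : k = i
    · subst hki; simp [List.getElem_set, h, hk]
    · simp [List.getElem_set, hki, Ne.symm hki, hk]

theorem pvXf_succ (D : List Int) (m : Nat) (h : m < D.length) :
    pvXf D (m + 1) = pvXf D m + D.getD m 0 := by
  unfold pvXf
  rw [List.sum_take_succ D m h]
  simp [List.getD_eq_getElem?_getD, List.getElem?_eq_getElem h]

-- --- fold-max characterisations ---
theorem pvStepM_append (v : Int) (ps : List (Int × Nat)) (q : Int × Nat) :
    pvStepM v (ps ++ [q]) = if v ≤ q.1 then max (pvStepM v ps) q.2 else pvStepM v ps := by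
  simp [pvStepM, List.foldl_append]

theorem pvMaxLen_append (ps : List (Int × Nat)) (q : Int × Nat) :
    pvMaxLen (ps ++ [q]) = max (pvMaxLen ps) q.2 := by
  simp [pvMaxLen, List.foldl_append]

theorem pvStepM_le (v : Int) (ps : List (Int × Nat)) (b : Nat)
    (h : ∀ p ∈ ps, v ≤ p.1 → p.2 ≤ b) : pvStepM v ps ≤ b := by
  induction ps using List.reverseRecOn with
  | nil => simp [pvStepM]
  | append_singleton ws q ih =>
    rw [pvStepM_append]
    have hq := h q (by simp)
    have hws : pvStepM v ws ≤ b := ih (fun p hp hv => h p (by simp [hp]) hv)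
    split <;> [exact max_le hws (hq (by assumption)); exact hws]

theorem pvStepM_ge (v : Int) (ps : List (Int × Nat)) (p : Int × Nat)
    (hp : p ∈ ps) (hv : v ≤ p.1) : p.2 ≤ pvStepM v ps := by
  induction ps using List.reverseRecOn with
  | nil => simp at hp
  | append_singleton ws q ih =>
    rw [pvStepM_append]
    rcases List.mem_append.mp hp with h | h
    · have := ih h
      split <;> omega
    · simp at h; subst h; simp [hv]

-- --- binary search: leftmost index with tails[k] < v (on a non-increasing list) ---
theorem pvBSearch_spec (tails : List Int) (v : Int)
    (hsort : ∀ k l, k ≤ l → l < tails.length → tails.getD l 0 ≤ tails.getD k 0) :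
    ∀ (d lo hi : Nat), hi - lo = d → hi ≤ tails.length →
      (∀ k, k < lo → v ≤ tails.getD k 0) →
      (∀ k, hi ≤ k → k < tails.length → tails.getD k 0 < v) →
      lo ≤ pvBSearch tails v lo hi ∧ pvBSearch tails v lo hi ≤ max lo hi ∧
      (∀ k, k < pvBSearch tails v lo hi → v ≤ tails.getD k 0) ∧
      (∀ k, pvBSearch tails v lo hi ≤ k → k < tails.length → tails.getD k 0 < v) := by
  intro d
  induction d using Nat.strong_induction_on with
  | _ d ih =>
    intro lo hi hd hhi hleft hright
    rw [pvBSearch]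
    split
    · next h =>
      simp only []
      split
      · next hlt =>
        have := ih ((lo + hi) / 2 - lo) (by omega) lo ((lo + hi) / 2) rfl (by omega) hleft
          (fun k hk1 hk2 => lt_of_le_of_lt (hsort ((lo + hi) / 2) k hk1 hk2) hlt)
        refine ⟨this.1, by omega, this.2.2⟩
      · next hge =>
        push_neg at hge
        have := ih (hi - ((lo + hi) / 2 + 1)) (by omega) ((lo + hi) / 2 + 1) hi rfl hhi
          (fun k hk => le_trans hge (hsort k ((lo + hi) / 2) (by omega) (by omega)))
          hright
        refine ⟨by omega, by omega, this.2.2⟩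
    · next h =>
      exact ⟨le_refl _, by omega, hleft, fun k hk1 hk2 => hright k (by omega) hk2⟩

-- with the invariant, the binary search result is exactly pvStepM
theorem pvGood_bsearch (ps : List (Int × Nat)) (tails : List Int) (v : Int)
    (hg : pvGood ps tails) :
    pvBSearch tails v 0 tails.length = pvStepM v ps := by
  obtain ⟨hlen, hex, hub, hsort⟩ := hg
  obtain ⟨h1, h2, h3, h4⟩ := pvBSearch_spec tails v hsort tails.length 0 tails.length rfl
    (le_refl _) (by omega) (by omega)
  set r := pvBSearch tails v 0 tails.length with hr
  have hrle : r ≤ tails.length := by omega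
  apply le_antisymm
  · -- r ≤ pvStepM: the witness at level r (if r ≥ 1)
    rcases Nat.eq_zero_or_pos r with h0 | h0
    · omega
    · obtain ⟨p, hp, hp2, hp1⟩ := hex (r - 1) (by omega)
      have := pvStepM_ge v ps p hp (by rw [hp1]; exact h3 (r-1) (by omega))
      omega
  · -- pvStepM ≤ r: any qualifying pair has level ≤ r
    apply pvStepM_le
    intro p hp hv
    obtain ⟨hp1, hp2, hp3⟩ := hub p hp
    by_contra hgt
    have hge : r ≤ p.2 - 1 := by omega
    have := h4 (p.2 - 1) hge hp1
    omega

-- one patience step preserves the invariant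
theorem pvGood_step (ps : List (Int × Nat)) (tails : List Int) (v : Int)
    (hg : pvGood ps tails) (hv : v ≤ 0) :
    pvGood (pvPsStep ps v)
      (let lo := pvBSearch tails v 0 tails.length
       if lo = tails.length then tails ++ [v] else tails.set lo v) := by
  have hbs := pvGood_bsearch ps tails v hg
  obtain ⟨hlen, hex, hub, hsort⟩ := hg
  obtain ⟨h1, h2, h3, h4⟩ := pvBSearch_spec tails v hsort tails.length 0 tails.length rfl
    (le_refl _) (by omega) (by omega)
  set lo := pvBSearch tails v 0 tails.length with hlo
  have h2' : lo ≤ tails.length := by omega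
  simp only [pvPsStep, if_pos hv]
  rw [← hbs]
  by_cases hcase : lo = tails.length
  · rw [if_pos hcase]
    refine ⟨?_, ?_, ?_, ?_⟩
    · rw [pvMaxLen_append]; simp only [List.length_append, List.length_cons, List.length_nil]
      omega
    · intro k hk
      simp only [List.length_append, List.length_cons, List.length_nil] at hk
      by_cases hk' : k = tails.length
      · refine ⟨(v, 1 + lo), by simp, by omega, ?_⟩
        subst hk'
        rw [pvGetD_append_right]
      · obtain ⟨p, hp, hp2, hp1⟩ := hex k (by omega)
        exact ⟨p, List.mem_append_left _ hp, hp2,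
          by rw [pvGetD_append_lt _ _ _ _ (by omega)]; exact hp1⟩
    · intro p hp
      rcases List.mem_append.mp hp with h | h
      · obtain ⟨ha, hb, hc⟩ := hub p h
        refine ⟨by simp; omega, ?_, hc⟩
        rw [pvGetD_append_lt _ _ _ _ ha]; exact hb
      · simp at h; subst h
        refine ⟨by simp; omega, ?_, by omega⟩
        have : 1 + lo - 1 = tails.length := by omega
        simp only [this]
        rw [pvGetD_append_right]
    · intro k l hkl hl
      simp only [List.length_append, List.length_cons, List.length_nil] at hl
      by_cases hl' : l = tails.length
      · subst hl'
        rw [pvGetD_append_right]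
        by_cases hk' : k = tails.length
        · subst hk'; rw [pvGetD_append_right]
        · rw [pvGetD_append_lt _ _ _ _ (by omega)]
          exact h3 k (by omega)
      · rw [pvGetD_append_lt _ _ _ _ (by omega), pvGetD_append_lt _ _ _ _ (by omega)]
        exact hsort k l hkl (by omega)
  · rw [if_neg hcase]
    have hlt : lo < tails.length := by omega
    have hv' : tails.getD lo 0 < v := h4 lo (le_refl _) hlt
    refine ⟨?_, ?_, ?_, ?_⟩
    · rw [pvMaxLen_append]; simp only [List.length_set]
      omega
    · intro k hk
      simp only [List.length_set] at hk
      by_cases hk' : k = lo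
      · refine ⟨(v, 1 + lo), by simp, by omega, ?_⟩
        subst hk'
        rw [pvGetD_set_self _ _ _ _ hlt]
      · obtain ⟨p, hp, hp2, hp1⟩ := hex k hk
        exact ⟨p, List.mem_append_left _ hp, hp2,
          by rw [pvGetD_set_ne _ _ _ _ _ hk']; exact hp1⟩
    · intro p hp
      rcases List.mem_append.mp hp with h | h
      · obtain ⟨ha, hb, hc⟩ := hub p h
        refine ⟨by simpa using ha, ?_, hc⟩
        by_cases hplo : p.2 - 1 = lo
        · rw [hplo, pvGetD_set_self _ _ _ _ hlt]
          rw [hplo] at hb; omega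
        · rw [pvGetD_set_ne _ _ _ _ _ hplo]; exact hb
      · simp at h; subst h
        refine ⟨by simp; omega, ?_, by omega⟩
        have : 1 + lo - 1 = lo := by omega
        simp only [this]
        rw [pvGetD_set_self _ _ _ _ hlt]
    · intro k l hkl hl
      simp only [List.length_set] at hl
      by_cases hl' : l = lo
      · subst hl'
        rw [pvGetD_set_self _ _ _ _ hlt]
        by_cases hk' : k = lo
        · subst hk'; rw [pvGetD_set_self _ _ _ _ hlt]
        · rw [pvGetD_set_ne _ _ _ _ _ hk']
          exact h3 k (by omega)
      · rw [pvGetD_set_ne _ _ _ _ _ hl']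
        by_cases hk' : k = lo
        · subst hk'; rw [pvGetD_set_self _ _ _ _ hlt]
          exact le_of_lt (lt_of_le_of_lt (hsort lo l hkl hl) hv')
        · rw [pvGetD_set_ne _ _ _ _ _ hk']
          exact hsort k l hkl hl

-- the patience fold maintains the invariant against the reference pair list
theorem pvGood_fold (vs : List Int) :
    pvGood (vs.foldl pvPsStep []) ((vs.foldl pvPatStep ([], 0)).1) := by
  induction vs using List.reverseRecOn with
  | nil =>
    refine ⟨by simp [pvMaxLen], ?_, ?_, ?_⟩ <;> simp
  | append_singleton ws u ih =>
    rw [List.foldl_append, List.foldl_append]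
    simp only [List.foldl_cons, List.foldl_nil]
    by_cases hu : u ≤ 0
    · have step := pvGood_step (ws.foldl pvPsStep []) ((ws.foldl pvPatStep ([], 0)).1) u ih hu
      simp only [pvPatStep, if_neg (by omega : ¬ 0 < u)]
      exact step
    · simp only [pvPsStep, if_neg hu, pvPatStep, if_pos (by omega : 0 < u)]
      exact ih

-- --- the inner loop of A over the reference pair list ---
def pvQ (H : Int) (D : List Int) (m : Nat) : List (Int × Option Int) :=
  (List.range m).map (fun j => (pvGf H D (j+1), pvDpv H D (j+1)))

def pvInner (v : Int) (q : List (Int × Option Int)) (s : Option Int) : Option Int :=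
  q.foldl (fun dpi p =>
    if v ≤ p.1 then (if pvOptLt dpi (pvOptAdd1 p.2) then pvOptAdd1 p.2 else dpi) else dpi) s

theorem pvVm_succ (H : Int) (D : List Int) (m : Nat) :
    pvVm H D (m+1) = pvVm H D m ++ [pvGf H D (m+1)] := by
  simp [pvVm, List.range_succ]

theorem pvPs_succ (H : Int) (D : List Int) (m : Nat) :
    pvPs H D (m+1) = pvPsStep (pvPs H D m) (pvGf H D (m+1)) := by
  rw [pvPs, pvVm_succ, List.foldl_append]
  rfl

theorem pvQ_succ (H : Int) (D : List Int) (m : Nat) :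
    pvQ H D (m+1) = pvQ H D m ++ [(pvGf H D (m+1), pvDpv H D (m+1))] := by
  simp [pvQ, List.range_succ]

theorem pvInner_append (v : Int) (q : List (Int × Option Int)) (e : Int × Option Int)
    (s : Option Int) :
    pvInner v (q ++ [e]) s =
      (if v ≤ e.1 then
        (if pvOptLt (pvInner v q s) (pvOptAdd1 e.2) then pvOptAdd1 e.2 else pvInner v q s)
       else pvInner v q s) := by
  simp [pvInner, List.foldl_append]

theorem pvInner_eval (H : Int) (D : List Int) (v : Int) (m : Nat) :
    (v ≤ 0 → pvInner v (pvQ H D m) (some 2) = some (2 + (pvStepM v (pvPs H D m) : Int))) ∧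
    (0 < v → pvInner v (pvQ H D m) none = none) := by
  induction m with
  | zero =>
    constructor
    · intro _; simp [pvQ, pvInner, pvPs, pvVm, pvStepM]
    · intro _; simp [pvQ, pvInner]
  | succ m ih =>
    rw [pvQ_succ]
    set u := pvGf H D (m+1) with hu
    have hdpv : pvDpv H D (m+1) =
        if u ≤ 0 then some (2 + (pvStepM u (pvPs H D m) : Int)) else none := by
      simp [pvDpv, ← hu]
    constructor
    · intro hv
      rw [pvInner_append, ih.1 hv, pvPs_succ, pvPsStep, ← hu]
      by_cases hvu : v ≤ u
      · rw [if_pos hvu]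
        by_cases hu0 : u ≤ 0
        · rw [if_pos hu0, pvStepM_append, if_pos hvu]
          rw [hdpv, if_pos hu0]
          simp only [pvOptAdd1, pvOptLt]
          set Mv := pvStepM v (pvPs H D m)
          set Mu := pvStepM u (pvPs H D m)
          by_cases hc : (2 + (Mv:Int)) < 2 + (Mu:Int) + 1
          · rw [if_pos (by simpa using hc)]
            congr 1
            have : max Mv (1 + Mu) = 1 + Mu := by omega
            rw [this]; push_cast; ring
          · rw [if_neg (by simpa using hc)]
            congr 1
            have : max Mv (1 + Mu) = Mv := by omega
            rw [this]
        · rw [if_neg hu0]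
          rw [hdpv, if_neg hu0]
          simp [pvOptAdd1, pvOptLt]
      · rw [if_neg hvu]
        by_cases hu0 : u ≤ 0
        · rw [if_pos hu0, pvStepM_append, if_neg hvu]
        · rw [if_neg hu0]
    · intro hv
      rw [pvInner_append, ih.2 hv]
      by_cases hvu : v ≤ u
      · rw [if_pos hvu]
        rw [hdpv, if_neg (show ¬ u ≤ 0 by omega)]
        simp [pvOptAdd1, pvOptLt]
      · rw [if_neg hvu]

-- --- evaluating port A against the reference ---
def pvDpArr (H : Int) (D : List Int) (n m : Nat) : List (Option Int) :=
  (List.range n).map (fun k => if k = 0 then some 1 else if k ≤ m then pvDpv H D k else none)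

theorem pvMapRange_congr {α : Type} (n : Nat) (f g : Nat → α)
    (h : ∀ k, k < n → f k = g k) : (List.range n).map f = (List.range n).map g :=
  List.map_congr_left fun k hk => h k (List.mem_range.mp hk)

theorem pvGetD_int (n : Nat) (f : Nat → Int) (i : Int) (h0 : 0 ≤ i) (hn : i < n) :
    PySem.List.pyGetD ((List.range n).map f) i 0 = f i.toNat := by
  rw [show i = ((i.toNat : Nat) : Int) from (Int.toNat_of_nonneg h0).symm]
  rw [PySem.List.pyGetD_natCast]
  exact pvGetD_map_range _ _ _ _ (by omega)

theorem pvGetD_dp_int (H : Int) (D : List Int) (n m : Nat) (i : Int) (h0 : 0 ≤ i) (hn : i < n) :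
    PySem.List.pyGetD (pvDpArr H D n m) i none =
      (if i.toNat = 0 then some 1 else if i.toNat ≤ m then pvDpv H D i.toNat else none) := by
  rw [show i = ((i.toNat : Nat) : Int) from (Int.toNat_of_nonneg h0).symm]
  rw [PySem.List.pyGetD_natCast, pvDpArr]
  exact pvGetD_map_range _ _ _ _ (by omega)

theorem pvInnerFull (H : Int) (D : List Int) (n m : Nat) (hm : m + 1 < n) :
    (if pvOptLt
        ((PySem.List.pyRange 0 (1 + (m:Int)) 1).foldl
          (fun dpi j =>
            if PySem.List.pyGetD ((List.range n).map (pvXf D)) (1 + (m:Int)) 0 -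
                PySem.List.pyGetD ((List.range n).map (pvXf D)) j 0 ≤ ((1 + (m:Int)) - j) * H then
              if pvOptLt dpi (pvOptAdd1 (PySem.List.pyGetD (pvDpArr H D n m) j none)) then
                pvOptAdd1 (PySem.List.pyGetD (pvDpArr H D n m) j none)
              else dpi
            else dpi)
          (PySem.List.pyGetD (pvDpArr H D n m) (1 + (m:Int)) none)) (some 1)
     then none
     else
      ((PySem.List.pyRange 0 (1 + (m:Int)) 1).foldl
          (fun dpi j =>
            if PySem.List.pyGetD ((List.range n).map (pvXf D)) (1 + (m:Int)) 0 -
                PySem.List.pyGetD ((List.range n).map (pvXf D)) j 0 ≤ ((1 + (m:Int)) - j) * H then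
              if pvOptLt dpi (pvOptAdd1 (PySem.List.pyGetD (pvDpArr H D n m) j none)) then
                pvOptAdd1 (PySem.List.pyGetD (pvDpArr H D n m) j none)
              else dpi
            else dpi)
          (PySem.List.pyGetD (pvDpArr H D n m) (1 + (m:Int)) none)))
    = pvDpv H D (m+1) := by
  have hstart : PySem.List.pyGetD (pvDpArr H D n m) (1 + (m:Int)) none = none := by
    rw [pvGetD_dp_int H D n m _ (by omega) (by push_cast; omega)]
    have : (1 + (m:Int)).toNat = m + 1 := by omega
    rw [this]
    simp
  have hfold :
      ((PySem.List.pyRange 0 (1 + (m:Int)) 1).foldl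
          (fun dpi j =>
            if PySem.List.pyGetD ((List.range n).map (pvXf D)) (1 + (m:Int)) 0 -
                PySem.List.pyGetD ((List.range n).map (pvXf D)) j 0 ≤ ((1 + (m:Int)) - j) * H then
              if pvOptLt dpi (pvOptAdd1 (PySem.List.pyGetD (pvDpArr H D n m) j none)) then
                pvOptAdd1 (PySem.List.pyGetD (pvDpArr H D n m) j none)
              else dpi
            else dpi)
          (PySem.List.pyGetD (pvDpArr H D n m) (1 + (m:Int)) none))
      = (if pvGf H D (m+1) ≤ 0 then some (2 + (pvStepM (pvGf H D (m+1)) (pvPs H D m) : Int)) else none) := by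
    rw [hstart]
    rw [PySem.List.pyRange_one_cons (by omega : (0:Int) < 1 + (m:Int)), List.foldl_cons]
    have hx1 : PySem.List.pyGetD ((List.range n).map (pvXf D)) (1 + (m:Int)) 0 = pvXf D (m+1) := by
      rw [pvGetD_int n _ _ (by omega) (by push_cast; omega)]
      congr 1; omega
    have hx0 : PySem.List.pyGetD ((List.range n).map (pvXf D)) 0 0 = pvXf D 0 := by
      rw [pvGetD_int n _ _ (by omega) (by push_cast; omega)]
      rfl
    have hdp0 : PySem.List.pyGetD (pvDpArr H D n m) 0 none = some 1 := by
      rw [pvGetD_dp_int H D n m _ (by omega) (by push_cast; omega)]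
      rfl
    rw [hx1, hx0, hdp0]
    have hxf0 : pvXf D 0 = 0 := by simp [pvXf]
    have hc0 : (pvXf D (m+1) - pvXf D 0 ≤ ((1 + (m:Int)) - 0) * H) ↔ pvGf H D (m+1) ≤ 0 := by
      rw [hxf0]
      have e : ((1 + (m:Int)) - 0) * H = ((m+1 : Nat) : Int) * H := by push_cast; ring
      rw [e]
      simp only [pvGf, sub_nonpos, sub_zero]
    have hrest : PySem.List.pyRange (0+1) (1 + (m:Int)) 1 =
        (List.range m).map (fun j : Nat => 1 + (j:Int)) := by
      have e1 : ((1 + (m:Int)) - (0+1)).toNat = m := by omega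
      rw [PySem.List.pyRange_one, e1]
      apply pvMapRange_congr
      intro k hk
      norm_num
    by_cases hg : pvGf H D (m+1) ≤ 0
    · rw [if_pos (hc0.mpr hg)]
      have hb1 : pvOptLt none (pvOptAdd1 (some 1)) = true := rfl
      rw [hb1, if_pos rfl]
      have hb2 : pvOptAdd1 (some 1) = some 2 := rfl
      rw [hb2, hrest, List.foldl_map, if_pos hg]
      have hval := (pvInner_eval H D (pvGf H D (m+1)) m).1 hg
      rw [pvInner, pvQ, List.foldl_map] at hval
      refine Eq.trans (PySem.List.foldl_congr_mem _ _ _ _ ?_) hval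
      intro acc j hj
      have hjm : j < m := List.mem_range.mp hj
      have hxj : PySem.List.pyGetD ((List.range n).map (pvXf D)) (1 + (j:Int)) 0 = pvXf D (j+1) := by
        rw [pvGetD_int n _ _ (by omega) (by push_cast; omega)]
        congr 1; omega
      have hdpj : PySem.List.pyGetD (pvDpArr H D n m) (1 + (j:Int)) none = pvDpv H D (j+1) := by
        rw [pvGetD_dp_int H D n m _ (by omega) (by push_cast; omega)]
        have : (1 + (j:Int)).toNat = j + 1 := by omega
        rw [this]
        simp [show ¬ (j + 1 = 0) by omega, show j + 1 ≤ m by omega]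
      have hcj : (pvXf D (m+1) - pvXf D (j+1) ≤ ((1 + (m:Int)) - (1 + (j:Int))) * H) ↔
          pvGf H D (m+1) ≤ pvGf H D (j+1) := by
        have e : ((1 + (m:Int)) - (1 + (j:Int))) * H
            = ((m+1 : Nat) : Int) * H - ((j+1 : Nat) : Int) * H := by push_cast; ring
        rw [e]
        simp only [pvGf]
        constructor <;> intro <;> linarith
      rw [hxj, hdpj]
      show _ = if pvGf H D (m+1) ≤ pvGf H D (j+1) then
          (if pvOptLt acc (pvOptAdd1 (pvDpv H D (j+1))) then pvOptAdd1 (pvDpv H D (j+1)) else acc)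
        else acc
      by_cases hc : pvGf H D (m+1) ≤ pvGf H D (j+1)
      · rw [if_pos (hcj.mpr hc), if_pos hc]
      · rw [if_neg (fun hh => hc (hcj.mp hh)), if_neg hc]
    · rw [if_neg (fun hh => hg (hc0.mp hh))]
      rw [hrest, List.foldl_map, if_neg hg]
      have hval := (pvInner_eval H D (pvGf H D (m+1)) m).2 (by omega)
      rw [pvInner, pvQ, List.foldl_map] at hval
      refine Eq.trans (PySem.List.foldl_congr_mem _ _ _ _ ?_) hval
      intro acc j hj
      have hjm : j < m := List.mem_range.mp hj
      have hxj : PySem.List.pyGetD ((List.range n).map (pvXf D)) (1 + (j:Int)) 0 = pvXf D (j+1) := by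
        rw [pvGetD_int n _ _ (by omega) (by push_cast; omega)]
        congr 1; omega
      have hdpj : PySem.List.pyGetD (pvDpArr H D n m) (1 + (j:Int)) none = pvDpv H D (j+1) := by
        rw [pvGetD_dp_int H D n m _ (by omega) (by push_cast; omega)]
        have : (1 + (j:Int)).toNat = j + 1 := by omega
        rw [this]
        simp [show ¬ (j + 1 = 0) by omega, show j + 1 ≤ m by omega]
      have hcj : (pvXf D (m+1) - pvXf D (j+1) ≤ ((1 + (m:Int)) - (1 + (j:Int))) * H) ↔
          pvGf H D (m+1) ≤ pvGf H D (j+1) := by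
        have e : ((1 + (m:Int)) - (1 + (j:Int))) * H
            = ((m+1 : Nat) : Int) * H - ((j+1 : Nat) : Int) * H := by push_cast; ring
        rw [e]
        simp only [pvGf]
        constructor <;> intro <;> linarith
      rw [hxj, hdpj]
      show _ = if pvGf H D (m+1) ≤ pvGf H D (j+1) then
          (if pvOptLt acc (pvOptAdd1 (pvDpv H D (j+1))) then pvOptAdd1 (pvDpv H D (j+1)) else acc)
        else acc
      by_cases hc : pvGf H D (m+1) ≤ pvGf H D (j+1)
      · rw [if_pos (hcj.mpr hc), if_pos hc]
      · rw [if_neg (fun hh => hc (hcj.mp hh)), if_neg hc]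
  rw [hfold]
  by_cases hg : pvGf H D (m+1) ≤ 0
  · rw [if_pos hg]
    have : pvOptLt (some (2 + (pvStepM (pvGf H D (m+1)) (pvPs H D m) : Int))) (some 1) = false := by
      simp [pvOptLt]
      omega
    rw [this]
    simp only [Bool.false_eq_true, if_false]
    simp [pvDpv, hg]
  · rw [if_neg hg]
    have : pvOptLt (none : Option Int) (some 1) = true := rfl
    rw [this, if_pos rfl]
    simp [pvDpv, hg]

theorem pvRepl_eq (D : List Int) (n : Nat) :
    (List.range n).map (fun k => if k ≤ 0 then pvXf D k else 0) = List.replicate n (0:Int) := by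
  have h : (List.range n).map (fun k => if k ≤ 0 then pvXf D k else 0)
      = (List.range n).map (fun _ => (0:Int)) := by
    apply pvMapRange_congr
    intro k hk
    by_cases h : k ≤ 0
    · have hk0 : k = 0 := by omega
      simp [hk0, pvXf]
    · simp [h]
  rw [h]
  simp [List.map_const']

theorem pvAx_eq (N H : Int) (D : List Int) (h1 : 1 ≤ N) (h2 : N - 1 ≤ (D.length:Int)) :
    pvAx N H D = (List.range N.toNat).map (pvXf D) := by
  unfold pvAx
  set n := N.toNat with hn
  have hD : n - 1 ≤ D.length := by omega
  have hn1 : 1 ≤ n := by omega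
  have hN : N = (n : Int) := by omega
  rw [hN, PySem.List.pyRange_one,
    show (((n:Int)) - 1).toNat = n - 1 from by omega, List.foldl_map]
  have key : ∀ m, m ≤ n - 1 →
      (List.range m).foldl (fun x (k:Nat) => PySem.List.pySetD x (1 + (k:Int))
          (PySem.List.pyGetD x ((1 + (k:Int)) - 1) 0 + PySem.List.pyGetD D ((1 + (k:Int)) - 1) 0))
        (List.replicate n 0)
      = (List.range n).map (fun k => if k ≤ m then pvXf D k else 0) := by
    intro m
    induction m with
    | zero =>
      intro _
      rw [List.range_zero, List.foldl_nil, pvRepl_eq]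
    | succ m ih =>
      intro hm
      rw [List.range_succ, List.foldl_append, ih (by omega), List.foldl_cons, List.foldl_nil]
      have e1 : (1 + ((m:Nat):Int)) - 1 = ((m:Nat):Int) := by push_cast; ring
      rw [e1, PySem.List.pyGetD_natCast, PySem.List.pyGetD_natCast,
        pvGetD_map_range n m _ 0 (by omega)]
      rw [show (1+(m:Int)) = ((m+1 : Nat):Int) from by push_cast; ring,
        PySem.List.pySetD_natCast, pvMapRange_set _ _ _ _ (by omega : m + 1 < n)]
      apply pvMapRange_congr
      intro k hk
      have hxs : pvXf D (m+1) = pvXf D m + D.getD m 0 :=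
        pvXf_succ D m (by omega)
      by_cases hk1 : k = m+1
      · simp [hk1, hxs]
      · by_cases hk2 : k ≤ m
        · simp [hk1, hk2, show k ≤ m + 1 from by omega]
        · simp [hk1, hk2, show ¬ (k ≤ m + 1) from by omega]
  have hfinal : (List.range n).map (fun k => if k ≤ n - 1 then pvXf D k else 0)
      = (List.range n).map (pvXf D) := by
    apply pvMapRange_congr
    intro k hk
    simp [show k ≤ n - 1 from by omega]
  exact (key (n-1) (le_refl _)).trans hfinal

theorem pvDp0_eq (H : Int) (D : List Int) (n : Nat) (hn : 1 ≤ n) :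
    PySem.List.pySetD (List.replicate n (none : Option Int)) 0 (some 1) = pvDpArr H D n 0 := by
  rw [show (0:Int) = ((0:Nat):Int) from rfl, PySem.List.pySetD_natCast]
  apply List.ext_getElem
  · simp [pvDpArr]
  · intro k hk hk'
    simp only [List.length_set, List.length_replicate] at hk
    by_cases h : k = 0
    · simp [pvDpArr, h, List.getElem_set, hk]
    · simp [pvDpArr, h, List.getElem_set, hk, eq_comm]

theorem pvAdp_eq (N H : Int) (D : List Int) (h1 : 1 ≤ N) (h2 : N - 1 ≤ (D.length:Int)) :
    pvAdp N H D = pvDpArr H D N.toNat (N.toNat - 1) := by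
  unfold pvAdp
  rw [pvAx_eq N H D h1 h2]
  set n := N.toNat with hn
  have hn1 : 1 ≤ n := by omega
  rw [pvDp0_eq H D n hn1]
  have hNe : N = 1 + ((n - 1 : Nat) : Int) := by omega
  rw [hNe]
  have key : ∀ m : Nat, m ≤ n - 1 →
      (PySem.List.pyRange 1 (1 + (m:Int)) 1).foldl
        (fun dp i =>
          let dpi := (PySem.List.pyRange 0 i 1).foldl
            (fun dpi j =>
              if PySem.List.pyGetD ((List.range n).map (pvXf D)) i 0 -
                  PySem.List.pyGetD ((List.range n).map (pvXf D)) j 0 ≤ (i - j) * H then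
                if pvOptLt dpi (pvOptAdd1 (PySem.List.pyGetD dp j none)) then
                  pvOptAdd1 (PySem.List.pyGetD dp j none)
                else dpi
              else dpi)
            (PySem.List.pyGetD dp i none)
          let dpi := if pvOptLt dpi (some 1) then none else dpi
          PySem.List.pySetD dp i dpi)
        (pvDpArr H D n 0)
      = pvDpArr H D n m := by
    intro m
    induction m with
    | zero =>
      intro _
      rw [show (1 + ((0:Nat):Int)) = 1 from by norm_num,
        PySem.List.pyRange_one_eq_nil (le_refl _), List.foldl_nil]
    | succ m ih =>
      intro hm
      have hsplit : PySem.List.pyRange 1 (1 + ((m+1:Nat):Int)) 1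
          = PySem.List.pyRange 1 (1 + (m:Int)) 1 ++ [1 + (m:Int)] := by
        rw [show (1 + ((m+1:Nat):Int)) = (1 + (m:Int)) + 1 from by push_cast; ring]
        exact PySem.List.pyRange_one_succ_right (by omega)
      rw [hsplit, List.foldl_append, ih (by omega), List.foldl_cons, List.foldl_nil]
      simp only []
      rw [pvInnerFull H D n m (by omega)]
      rw [show (1+(m:Int)) = ((m+1 : Nat):Int) from by push_cast; ring,
        PySem.List.pySetD_natCast]
      show ((List.range n).map _).set (m+1) _ = _
      rw [pvMapRange_set _ _ _ _ (by omega : m + 1 < n)]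
      apply pvMapRange_congr
      intro k hk
      by_cases hk1 : k = m+1
      · simp [hk1, show ¬ (m + 1 = 0) from by omega, show m + 1 ≤ m + 1 from le_refl _]
      · by_cases hk0 : k = 0
        · simp [hk0, hk1]
        · by_cases hk2 : k ≤ m
          · simp [hk1, hk0, hk2, show k ≤ m + 1 from by omega]
          · simp [hk1, hk0, hk2, show ¬ (k ≤ m + 1) from by omega]
  exact key (n-1) (le_refl _)

-- --- evaluating port B against the reference ---
theorem pvBg_eq (N H : Int) (D : List Int) (h1 : 1 ≤ N) (h2 : N - 1 ≤ (D.length:Int)) :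
    pvBg N H D = (List.range N.toNat).map (pvGf H D) := by
  unfold pvBg
  set n := N.toNat with hn
  have hD : n - 1 ≤ D.length := by omega
  have key : ∀ m, m ≤ n →
      ((List.range m).foldl
        (fun (p : List Int × Int) i =>
          let acc := if i = 0 then p.2 else p.2 + D.getD (i-1) 0
          (p.1 ++ [acc - (i : Int) * H], acc))
        ([], 0))
      = ((List.range m).map (pvGf H D), pvXf D (m-1)) := by
    intro m
    induction m with
    | zero =>
      intro _
      simp [pvXf]
    | succ m ih =>
      intro hm
      rw [List.range_succ, List.foldl_append, ih (by omega), List.foldl_cons, List.foldl_nil]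
      simp only []
      by_cases hm0 : m = 0
      · subst hm0
        simp [pvGf, pvXf]
      · rw [if_neg hm0]
        have hacc : pvXf D (m-1) + D.getD (m-1) 0 = pvXf D m := by
          have := pvXf_succ D (m-1) (by omega)
          rw [show m - 1 + 1 = m from by omega] at this
          omega
        rw [hacc, show (m + 1 - 1 : Nat) = m from by omega]
        simp [pvGf]
  have := key n (le_refl _)
  rw [this]

theorem pvDrop_g (H : Int) (D : List Int) (n : Nat) (hn : 1 ≤ n) :
    ((List.range n).map (pvGf H D)).drop 1 = pvVm H D (n-1) := by
  obtain ⟨m, rfl⟩ : ∃ m, n = m + 1 := ⟨n - 1, by omega⟩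
  rw [List.range_succ_eq_map]
  simp [pvVm, List.map_map, Function.comp_def]

theorem efeito_domino_main (N H : Int) (D : List Int)
    (h1 : 1 ≤ N) (h2 : N - 1 ≤ (D.length:Int)) :
    efeito_domino N H D = efeito_domino_alt N H D := by
  unfold efeito_domino efeito_domino_alt
  rw [pvAdp_eq N H D h1 h2, pvBg_eq N H D h1 h2]
  set n := N.toNat with hn
  have hn1 : 1 ≤ n := by omega
  have hNm1 : (N - 1) = (((n-1:Nat)):Int) := by omega
  have hdpN : PySem.List.pyGetD (pvDpArr H D n (n-1)) (N-1) none
      = (if n-1 = 0 then some 1 else pvDpv H D (n-1)) := by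
    rw [hNm1, PySem.List.pyGetD_natCast, pvDpArr, pvGetD_map_range _ _ _ _ (by omega)]
    by_cases h : n - 1 = 0
    · simp [h]
    · simp [h]
  rw [hdpN]
  have hgN : ((List.range n).map (pvGf H D)).getD (n - 1) 0 = pvGf H D (n-1) :=
    pvGetD_map_range _ _ _ _ (by omega)
  rw [hgN]
  by_cases hone : n = 1
  · have hN1 : N = 1 := by omega
    rw [if_pos (Or.inl hN1)]
    rw [if_pos (show n - 1 = 0 from by omega)]
    have : pvOptLt (some 1) (some 2) = true := rfl
    rw [this, if_pos rfl]
  · have hn2 : 2 ≤ n := by omega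
    have hne : ¬ (N = 1) := by omega
    rw [if_neg (show ¬ (n - 1 = 0) from by omega)]
    by_cases hg : pvGf H D (n-1) ≤ 0
    · rw [if_neg (show ¬ (N = 1 ∨ 0 < pvGf H D (n-1)) from by
        rintro (h | h) <;> omega)]
      rw [pvDrop_g H D n hn1]
      have hsplitv : pvVm H D (n-1) = pvVm H D (n-2) ++ [pvGf H D (n-1)] := by
        have h := pvVm_succ H D (n-2)
        rw [show n-2+1 = n-1 from by omega] at h
        exact h
      rw [hsplitv, List.foldl_append, List.foldl_cons, List.foldl_nil]
      have hgood : pvGood (pvPs H D (n-2)) ((pvVm H D (n-2)).foldl pvPatStep ([], 0)).1 :=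
        pvGood_fold (pvVm H D (n-2))
      set st := (pvVm H D (n-2)).foldl pvPatStep ([], 0) with hst
      have hlo : pvBSearch st.1 (pvGf H D (n-1)) 0 st.1.length
          = pvStepM (pvGf H D (n-1)) (pvPs H D (n-2)) :=
        pvGood_bsearch _ _ _ hgood
      have hsnd : (pvPatStep st (pvGf H D (n-1))).2
          = pvStepM (pvGf H D (n-1)) (pvPs H D (n-2)) + 1 := by
        rw [pvPatStep, if_neg (show ¬ (0 < pvGf H D (n-1)) from by omega)]
        simp only []
        rw [hlo]
      rw [hsnd]
      have hdpv : pvDpv H D (n-1)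
          = some (2 + (pvStepM (pvGf H D (n-1)) (pvPs H D (n-2)) : Int)) := by
        rw [pvDpv, if_neg (show ¬ (n - 1 = 0) from by omega), if_pos hg,
          show n - 1 - 1 = n - 2 from by omega]
      rw [hdpv]
      have hlt : pvOptLt (some (2 + (pvStepM (pvGf H D (n-1)) (pvPs H D (n-2)) : Int))) (some 2)
          = false := by
        simp [pvOptLt]
        omega
      rw [hlt]
      simp only [Bool.false_eq_true, if_false, Option.getD_some]
      push_cast
      ring
    · rw [if_pos (Or.inr (by omega : 0 < pvGf H D (n-1)))]
      have hdpv : pvDpv H D (n-1) = none := by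
        rw [pvDpv, if_neg (show ¬ (n - 1 = 0) from by omega), if_neg hg]
      rw [hdpv]
      have : pvOptLt none (some 2) = true := rfl
      rw [this, if_pos rfl]

-- ===== VERDICT (by name: the statement is the Claim_ definition above) =====
theorem efeito_domino_spec : Claim_equal_efeito_domino := by
  intro N H D _ hpre
  exact efeito_domino_main N H D hpre.1 hpre.2
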